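-- pv_equiv track=rewrite | github.com/domp47/AC-Group-Guide | DataScript/generateData.py | createMonthBitMask
-- ===== SOURCE A (Python) =====
-- def createMonthBitMask(monthList):
--     if len(monthList) != 12:
--         raise Exception(f"A Year has 12 months not {len(monthList)}")
--
--     mask = 0
--     for month in monthList:
--         mask = mask << 1
--         mask += 0 if month == '-' else 1
--
--     return mask
-- ===== SOURCE B (Python) =====
-- def createMonthBitMask(monthList):
--     if len(monthList) != 12:
--         raise Exception(f"A Year has 12 months not {len(monthList)}")
--
--     return sum(1 << (11 - i) for i, month in enumerate(monthList) if month != '-')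
-- ===== Notes on version B (the rewrite author's own statement) =====
-- stated objective: idiomatic
-- what changed: B replaces the sequential shift-and-add accumulator with a direct sum of positional powers of two (1 << (11 - i)) over the enumerated months.
import Mathlib
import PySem

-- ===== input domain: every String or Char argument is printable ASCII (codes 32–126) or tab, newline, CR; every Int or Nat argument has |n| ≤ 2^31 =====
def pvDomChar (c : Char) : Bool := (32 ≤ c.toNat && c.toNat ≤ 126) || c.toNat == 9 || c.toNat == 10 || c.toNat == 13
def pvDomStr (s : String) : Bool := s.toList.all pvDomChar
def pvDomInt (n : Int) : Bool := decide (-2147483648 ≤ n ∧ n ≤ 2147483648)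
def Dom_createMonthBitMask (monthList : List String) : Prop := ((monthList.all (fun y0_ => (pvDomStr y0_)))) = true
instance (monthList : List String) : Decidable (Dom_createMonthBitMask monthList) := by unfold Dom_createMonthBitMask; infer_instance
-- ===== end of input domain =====

-- B re-states the mask as a direct sum of positional powers of two instead of A's
-- sequential shift-and-add accumulator; same return value on every 12-element list.

-- ===== PORT A =====
-- A: guard (raise on len ≠ 12, excluded by Pre_; 0 here is unreachable under Pre_),
-- then fold: mask = (mask << 1) + (0 if month == '-' else 1).
def createMonthBitMask (monthList : List String) : Int :=
  if monthList.length ≠ 12 then 0   -- Python raises here; outside Pre_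
  else monthList.foldl (fun (mask : Int) (month : String) => (mask <<< 1) + (if month = "-" then 0 else 1)) 0

-- ===== PORT B =====
-- B: same guard, then sum(1 << (11 - i) for i, month in enumerate(monthList) if month != '-').
def createMonthBitMask_alt (monthList : List String) : Int :=
  if monthList.length ≠ 12 then 0   -- Python raises here; outside Pre_
  else (PySem.List.enumerate monthList).foldl
    -- (11 - i).toNat: within Pre_ i ≤ 11, so the shift is never negative
    (fun (acc : Int) (p : Int × String) => if p.2 ≠ "-" then acc + ((1 : Int) <<< ((11 - p.1).toNat)) else acc) 0

-- ===== PRECONDITION & SPEC =====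
-- A raises Exception unless the list has exactly 12 elements.
def Pre_createMonthBitMask (monthList : List String) : Prop := monthList.length = 12
instance (monthList : List String) : Decidable (Pre_createMonthBitMask monthList) := by
  unfold Pre_createMonthBitMask; infer_instance
def pvWitness_createMonthBitMask : List String :=
  ["Jan", "-", "Mar", "-", "May", "-", "Jul", "-", "Sep", "-", "Nov", "-"]

def Spec_createMonthBitMask (monthList : List String) (out : Int) : Prop := out = createMonthBitMask_alt monthList
instance (monthList : List String) (out : Int) : Decidable (Spec_createMonthBitMask monthList out) := by unfold Spec_createMonthBitMask; infer_instance

-- ===== CLAIM (what is proved, stated in full; the proofs are below) =====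
def Claim_equal_createMonthBitMask : Prop := ∀ (monthList : List String), Dom_createMonthBitMask monthList → Pre_createMonthBitMask monthList → Spec_createMonthBitMask monthList (createMonthBitMask monthList)

-- ===== LEMMAS AND PROOFS =====

lemma pvShl1 (a : Int) : a <<< (1 : Int) = a * 2 := by
  have h := Int.shiftLeft_natCast_right a 1
  norm_num at h
  rw [h, Int.shiftLeft_eq]; norm_num

lemma foldA_shift (xs : List String) : ∀ a : Int,
    xs.foldl (fun (mask : Int) (month : String) => (mask <<< 1) + (if month = "-" then 0 else 1)) a
      = a * 2 ^ xs.length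
        + xs.foldl (fun (mask : Int) (month : String) => (mask <<< 1) + (if month = "-" then 0 else 1)) 0 := by
  induction xs with
  | nil => intro a; simp
  | cons x xs ih =>
    intro a
    simp only [List.foldl_cons, List.length_cons]
    conv_lhs => rw [ih]
    conv_rhs => rw [ih]
    simp only [pvShl1]
    ring

lemma foldB_shift (l : List (Int × String)) : ∀ acc : Int,
    l.foldl (fun (acc : Int) (p : Int × String) => if p.2 ≠ "-" then acc + ((1 : Int) <<< ((11 - p.1).toNat)) else acc) acc
      = acc + l.foldl (fun (acc : Int) (p : Int × String) => if p.2 ≠ "-" then acc + ((1 : Int) <<< ((11 - p.1).toNat)) else acc) 0 := by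
  induction l with
  | nil => intro acc; simp
  | cons p l ih =>
    intro acc
    simp only [List.foldl_cons]
    conv_lhs => rw [ih]
    conv_rhs => rw [ih]
    split_ifs <;> ring

-- the enumerated sum of positional powers equals the shift-and-add fold of the suffix
lemma foldB_eq_foldA (xs : List String) : ∀ s : Int, 0 ≤ s → s.toNat + xs.length = 12 →
    (PySem.List.enumerate xs s).foldl
        (fun (acc : Int) (p : Int × String) => if p.2 ≠ "-" then acc + ((1 : Int) <<< ((11 - p.1).toNat)) else acc) 0
      = xs.foldl (fun (mask : Int) (month : String) => (mask <<< 1) + (if month = "-" then 0 else 1)) 0 := by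
  induction xs with
  | nil => intro s _ _; simp [PySem.List.enumerate_nil]
  | cons x xs ih =>
    intro s hs hlen
    simp only [List.length_cons] at hlen
    rw [PySem.List.enumerate_cons, List.foldl_cons, List.foldl_cons,
      foldB_shift, foldA_shift,
      ih (s + 1) (by omega) (by omega)]
    have he : (11 - s).toNat = xs.length := by omega
    by_cases hx : x = "-" <;> simp [hx, pvShl1, Int.shiftLeft_eq, he]

-- ===== VERDICT (by name: the statement is the Claim_ definition above) =====
theorem createMonthBitMask_spec : Claim_equal_createMonthBitMask := by
  intro monthList _ hpre
  unfold Pre_createMonthBitMask at hpre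
  unfold Spec_createMonthBitMask createMonthBitMask createMonthBitMask_alt
  rw [if_neg (by omega), if_neg (by omega)]
  exact (foldB_eq_foldA monthList 0 le_rfl (by simpa using hpre)).symm
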